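-- pv_equiv track=rewrite | github.com/jemtca/CodingBat | Python/List-2/two_two.py | two_two
-- ===== SOURCE A (Python) =====
-- def two_two(nums):
--     b = True
--
--     for x in range(len(nums)):
--         if len(nums) == 1 and nums[x] == 2:
--             b = False
--         elif x == 0 and nums[x] == 2 and nums[x+1] != 2:
--             b = False
--         elif x == len(nums)-1 and nums[len(nums)-1] == 2 and nums[len(nums)-2] != 2:
--             b = False
--         elif x < len(nums)-1 and (nums[x] == 2 and nums[x+1] != 2) and (nums[x] == 2 and nums[x-1] != 2):
--             b = False
--
--
--     return b
-- ===== SOURCE B (Python) =====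
-- def two_two(nums):
--     run = 0
--     for n in nums:
--         if n == 2:
--             run += 1
--         else:
--             if run == 1:
--                 return False
--             run = 0
--     return run != 1
-- ===== Notes on version B (the rewrite author's own statement) =====
-- stated objective: simpler
-- what changed: Replaces A's index loop with its four boundary-case branches (first/last/middle/singleton, with negative-index reads) by a single run-length pass with early exit: count consecutive 2s and fail exactly when a maximal run of 2s has length 1.
import Mathlib
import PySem

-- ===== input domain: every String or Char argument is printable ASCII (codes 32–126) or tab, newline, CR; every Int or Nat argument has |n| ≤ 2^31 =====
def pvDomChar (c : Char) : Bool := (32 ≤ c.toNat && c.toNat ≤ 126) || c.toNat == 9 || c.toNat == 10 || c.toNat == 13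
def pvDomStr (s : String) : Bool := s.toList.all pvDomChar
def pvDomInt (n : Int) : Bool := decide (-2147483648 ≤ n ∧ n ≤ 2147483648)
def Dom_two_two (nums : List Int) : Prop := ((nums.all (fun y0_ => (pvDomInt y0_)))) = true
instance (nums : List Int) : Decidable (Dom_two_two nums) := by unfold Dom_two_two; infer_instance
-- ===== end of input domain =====

-- B replaces A's four-way index/boundary case analysis by one run-length pass; objective: simpler.

-- ===== PORT A =====
-- pyGetD is used for A's subscripts: every subscript whose value A's branch conditions actually
-- depend on is in range (or Python's defined negative-index wraparound, nums[-1]); the only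
-- out-of-range read, nums[x+1] when x+1 = len inside branch 2, is short-circuited in Python and
-- its conjunction is already false there, so the default never influences a condition's value.
def two_two (nums : List Int) : Bool :=
  (PySem.List.pyRange 0 (nums.length : Int) 1).foldl (fun b x =>
    if nums.length = 1 ∧ PySem.List.pyGetD nums x 0 = 2 then false
    else if x = 0 ∧ PySem.List.pyGetD nums x 0 = 2 ∧ PySem.List.pyGetD nums (x+1) 0 ≠ 2 then false
    else if x = (nums.length : Int) - 1 ∧ PySem.List.pyGetD nums ((nums.length : Int) - 1) 0 = 2 ∧ PySem.List.pyGetD nums ((nums.length : Int) - 2) 0 ≠ 2 then false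
    else if x < (nums.length : Int) - 1 ∧ (PySem.List.pyGetD nums x 0 = 2 ∧ PySem.List.pyGetD nums (x+1) 0 ≠ 2) ∧ (PySem.List.pyGetD nums x 0 = 2 ∧ PySem.List.pyGetD nums (x-1) 0 ≠ 2) then false
    else b) true

-- ===== PORT B =====
-- B's loop with its early 'return False' becomes structural recursion carrying the run counter.
def twoTwoGo (run : Int) : List Int → Bool
  | [] => run ≠ 1
  | n :: rest =>
      if n = 2 then twoTwoGo (run + 1) rest
      else if run = 1 then false
      else twoTwoGo 0 rest

def two_two_alt (nums : List Int) : Bool := twoTwoGo 0 nums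

-- ===== PRECONDITION & SPEC =====
def Spec_two_two (nums : List Int) (out : Bool) : Prop := out = two_two_alt nums
instance (nums : List Int) (out : Bool) : Decidable (Spec_two_two nums out) := by unfold Spec_two_two; infer_instance

-- ===== CLAIM (what is proved, stated in full; the proofs are below) =====
def Claim_equal_two_two : Prop := ∀ (nums : List Int), Dom_two_two nums → Spec_two_two nums (two_two nums)

-- ===== LEMMAS AND PROOFS =====

-- Bool marker: position i of l holds a "lone 2" (2 with no neighbouring 2), where p2 says
-- whether a virtual element just before l equals 2.
def loneIdx (p2 : Bool) (l : List Int) (i : Nat) : Bool :=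
  (l.getD i 0 == 2) && (if i = 0 then !p2 else !(l.getD (i-1) 0 == 2)) && !(l.getD (i+1) 0 == 2)

-- structural version of "l contains a lone 2", same p2 convention
def hasLone (p2 : Bool) : List Int → Bool
  | [] => false
  | a :: t => if a == 2 then ((!p2 && !(t.getD 0 0 == 2)) || hasLone true t) else hasLone false t

-- the disjunction of A's four branch conditions, as one Bool
def condA (l : List Int) (x : Int) : Bool :=
  decide (l.length = 1 ∧ PySem.List.pyGetD l x 0 = 2) ||
  decide (x = 0 ∧ PySem.List.pyGetD l x 0 = 2 ∧ PySem.List.pyGetD l (x+1) 0 ≠ 2) ||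
  decide (x = (l.length : Int) - 1 ∧ PySem.List.pyGetD l ((l.length : Int) - 1) 0 = 2 ∧ PySem.List.pyGetD l ((l.length : Int) - 2) 0 ≠ 2) ||
  decide (x < (l.length : Int) - 1 ∧ (PySem.List.pyGetD l x 0 = 2 ∧ PySem.List.pyGetD l (x+1) 0 ≠ 2) ∧ (PySem.List.pyGetD l x 0 = 2 ∧ PySem.List.pyGetD l (x-1) 0 ≠ 2))

theorem foldl_if4 {α : Type} {C1 C2 C3 C4 : α → Prop} [DecidablePred C1] [DecidablePred C2]
    [DecidablePred C3] [DecidablePred C4] :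
    ∀ (xs : List α) (b : Bool),
      xs.foldl (fun b x =>
        if C1 x then false else if C2 x then false else if C3 x then false
        else if C4 x then false else b) b
      = (b && !(xs.any fun x => decide (C1 x) || decide (C2 x) || decide (C3 x) || decide (C4 x))) := by
  intro xs
  induction xs with
  | nil => simp
  | cons x t ih =>
      intro b
      simp only [List.foldl_cons, List.any_cons, ih]
      split_ifs <;> simp_all

theorem A_eq_any (l : List Int) :
    two_two l = !((List.range l.length).any fun k => condA l (k : Int)) := by
  unfold two_two
  rw [PySem.List.pyRange_zero_nat, List.foldl_map, foldl_if4]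
  simp [condA]

theorem condA_eq_loneIdx (l : List Int) (k : Nat) (hk : k < l.length) :
    condA l (k : Int) = loneIdx false l k := by
  by_cases h1 : l.length = 1
  · obtain ⟨a, rfl⟩ := List.length_eq_one_iff.mp h1
    have hk0 : k = 0 := by simp at hk; omega
    subst hk0
    simp only [condA, loneIdx]
    by_cases ha : a = 2 <;>
      simp [PySem.List.pyGetD, PySem.List.pyGet?, PySem.List.pyIdx?, List.getD, ha]
  · have hlen2 : 2 ≤ l.length := by omega
    by_cases hk0 : k = 0
    · subst hk0
      have e1 : ((0:Nat):Int) + 1 = ((1:Nat):Int) := by norm_num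
      have hc1 : ¬ (l.length = 1) := h1
      have hc3 : ¬ ((0:Int) = (l.length:Int) - 1) := by omega
      have hc4a : ((0:Int)) < (l.length:Int) - 1 := by omega
      simp only [condA, loneIdx, e1, PySem.List.pyGetD_natCast]
      by_cases hP : l[0]?.getD 0 = 2 <;> by_cases hQ : l[1]?.getD 0 = 2 <;>
        simp [hc1, hc3, hc4a, hP, hQ]
    · by_cases hklast : k = l.length - 1
      · have ekk : ((k:Nat):Int) = (l.length:Int) - 1 := by omega
        have elen1 : (l.length:Int) - 1 = ((l.length - 1 : Nat):Int) := by omega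
        have elen2 : (l.length:Int) - 2 = ((l.length - 2 : Nat):Int) := by omega
        have ek1 : ((k:Nat):Int) + 1 = ((k+1:Nat):Int) := by push_cast; ring
        have h10 : ¬ (l.length - 1 = 0) := by omega
        have h11 : l.length - 1 + 1 = l.length := by omega
        have h12 : l.length - 1 - 1 = l.length - 2 := by omega
        have hout2 : l[l.length]? = none := List.getElem?_eq_none (by omega)
        have hc2 : ¬ (((k:Nat):Int) = 0) := by omega
        have hc4 : ¬ (((k:Nat):Int) < (l.length:Int) - 1) := by omega
        have ekn : k = l.length - 1 := hklast
        simp only [condA, loneIdx, ek1, PySem.List.pyGetD_natCast]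
        rw [ekk, elen1, elen2]
        simp only [PySem.List.pyGetD_natCast]
        have hki : ¬ (k = 0) := hk0
        by_cases hP : l[l.length-1]?.getD 0 = 2 <;> by_cases hQ : l[l.length-2]?.getD 0 = 2 <;>
          simp [h1, hc2, hc4, hP, hQ, hki, ekn, h10, h11, h12, hout2]
      · have hkmid : 1 ≤ k ∧ k + 1 < l.length := by omega
        have ek1 : ((k:Nat):Int) + 1 = ((k+1:Nat):Int) := by push_cast; ring
        have ekm1 : ((k:Nat):Int) - 1 = ((k-1:Nat):Int) := by omega
        have hc2 : ¬ (((k:Nat):Int) = 0) := by omega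
        have hc3 : ¬ (((k:Nat):Int) = (l.length:Int) - 1) := by omega
        have hc4 : ((k:Nat):Int) < (l.length:Int) - 1 := by omega
        simp only [condA, loneIdx, ek1, ekm1, PySem.List.pyGetD_natCast]
        have hki : ¬ (k = 0) := hk0
        by_cases hP : l[k]?.getD 0 = 2 <;> by_cases hQ : l[k+1]?.getD 0 = 2 <;>
          by_cases hR : l[k-1]?.getD 0 = 2 <;>
          simp [h1, hc2, hc3, hc4, hP, hQ, hR, hki]

theorem loneIdx_succ (p2 : Bool) (a : Int) (t : List Int) (i : Nat) :
    loneIdx p2 (a :: t) (i + 1) = loneIdx (a == 2) t i := by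
  cases i with
  | zero => simp [loneIdx, List.getD]
  | succ j => simp [loneIdx, List.getD]

theorem hasLone_eq_any (l : List Int) : ∀ p2 : Bool,
    hasLone p2 l = (List.range l.length).any (loneIdx p2 l) := by
  induction l with
  | nil => intro p2; simp [hasLone]
  | cons a t ih =>
      intro p2
      simp only [List.length_cons, List.range_succ_eq_map, List.any_cons, List.any_map]
      have h0 : loneIdx p2 (a :: t) 0 = ((a == 2) && !p2 && !(t.getD 0 0 == 2)) := by
        simp [loneIdx, List.getD]
      have hfun : (loneIdx p2 (a :: t) ∘ Nat.succ) = loneIdx (a == 2) t := by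
        funext i
        exact loneIdx_succ p2 a t i
      show hasLone p2 (a :: t) = _
      by_cases ha : a = 2
      · subst ha
        simp only [hasLone, h0, hfun, ← ih]
        simp
      · have hbe : (a == 2) = false := by simp [ha]
        simp only [hasLone, h0, hfun, hbe, ← ih]
        simp

theorem twoTwoGo_ge2 (l : List Int) : ∀ r : Int, 2 ≤ r → twoTwoGo r l = twoTwoGo 2 l := by
  induction l with
  | nil => intro r hr; simp [twoTwoGo]; omega
  | cons n t ih =>
      intro r hr
      simp only [twoTwoGo]
      by_cases hn : n = 2
      · simp only [hn]
        rw [ih (r+1) (by omega), ih (2+1) (by omega)]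
        simp
      · have h1 : ¬ r = 1 := by omega
        simp [hn, h1]

theorem B_eq_hasLone (l : List Int) :
    twoTwoGo 0 l = !hasLone false l ∧ twoTwoGo 2 l = !hasLone true l := by
  have key : ∀ n (l : List Int), l.length ≤ n →
      twoTwoGo 0 l = !hasLone false l ∧ twoTwoGo 2 l = !hasLone true l := by
    intro n
    induction n with
    | zero =>
        intro l hl
        have : l = [] := List.eq_nil_of_length_eq_zero (by omega)
        subst this; simp [twoTwoGo, hasLone]
    | succ n ih =>
        intro l hl
        cases l with
        | nil => simp [twoTwoGo, hasLone]
        | cons a t =>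
            by_cases ha : a = 2
            · subst ha
              constructor
              · show twoTwoGo 0 (2 :: t) = !hasLone false (2 :: t)
                simp only [twoTwoGo, hasLone]
                cases t with
                | nil => simp [twoTwoGo, hasLone]
                | cons b u =>
                    by_cases hb : b = 2
                    · subst hb
                      have hu : u.length ≤ n := by simp at hl; omega
                      have := (ih u hu).2
                      simp only [twoTwoGo, zero_add, one_add_one_eq_two] at *
                      simp [hasLone, this]
                    · simp [twoTwoGo, hasLone, hb, List.getD]
              · show twoTwoGo 2 (2 :: t) = !hasLone true (2 :: t)
                have ht : t.length ≤ n := by simp at hl; omega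
                simp only [twoTwoGo, hasLone]
                rw [twoTwoGo_ge2 t (2+1) (by omega), (ih t ht).2]
                simp
            · have ht : t.length ≤ n := by simp at hl; omega
              constructor
              · simp only [twoTwoGo, hasLone, ha]
                simp [(ih t ht).1, ha]
              · simp only [twoTwoGo, hasLone, ha]
                simp [(ih t ht).1, ha]
  exact key l.length l le_rfl

theorem any_congr_mem {α : Type} (xs : List α) (f g : α → Bool)
    (h : ∀ x ∈ xs, f x = g x) : xs.any f = xs.any g := by
  induction xs with
  | nil => rfl
  | cons a t ih =>
      simp only [List.any_cons, h a (by simp)]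
      rw [ih (fun x hx => h x (by simp [hx]))]

theorem eq_main (l : List Int) : two_two l = two_two_alt l := by
  rw [A_eq_any]
  have h : ((List.range l.length).any fun k => condA l (k : Int))
      = (List.range l.length).any (loneIdx false l) := by
    apply any_congr_mem
    intro k hkmem
    exact condA_eq_loneIdx l k (List.mem_range.mp hkmem)
  rw [h, ← hasLone_eq_any]
  simp [two_two_alt, (B_eq_hasLone l).1]

-- ===== VERDICT (by name: the statement is the Claim_ definition above) =====
theorem two_two_spec : Claim_equal_two_two := by
  intro nums _
  show two_two nums = two_two_alt nums
  exact eq_main nums
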